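-- pv_equiv track=rewrite | github.com/beaglemansion/yesjam | programmers/k번째수.py | solution
-- ===== SOURCE A (Python) =====
-- def solution(array, commands):
--     answer = []
--
--     for com in commands:
--         i = com[0]
--         j = com[1]
--         k = com[2]
--         array2 = sorted(array[i - 1:j])
--         answer.append(array2[k - 1])
--
--     return answer
-- ===== SOURCE B (Python) =====
-- def solution(array, commands):
--     answer = []
--     for com in commands:
--         i, j, k = com[0], com[1], com[2]
--         best = []  # the k smallest values scanned so far, in ascending order
--         for x in array[i - 1:j]:
--             if len(best) < k or x < best[-1]:
--                 best = ([v for v in best if v <= x] + [x]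
--                         + [v for v in best if v > x])[:k]
--         answer.append(best[k - 1])
--     return answer
-- ===== Notes on version B (the rewrite author's own statement) =====
-- stated objective: alternative
-- what changed: Instead of fully sorting each slice and indexing, B maintains a bounded buffer of the k smallest elements seen (partial selection), appending best[k-1]; Pre_ excludes inputs where A raises (short commands, k-1 out of the slice's index range) and also k <= 0 with -len <= k-1 < 0, where A's negative-index wraparound accidentally returns a value while B's selection buffer naturally raises IndexError.
-- outside the precondition, e.g. on solution([1, 2, 3], [[1, 3, 0]]): A returns [3], B raises IndexError
import Mathlib
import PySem

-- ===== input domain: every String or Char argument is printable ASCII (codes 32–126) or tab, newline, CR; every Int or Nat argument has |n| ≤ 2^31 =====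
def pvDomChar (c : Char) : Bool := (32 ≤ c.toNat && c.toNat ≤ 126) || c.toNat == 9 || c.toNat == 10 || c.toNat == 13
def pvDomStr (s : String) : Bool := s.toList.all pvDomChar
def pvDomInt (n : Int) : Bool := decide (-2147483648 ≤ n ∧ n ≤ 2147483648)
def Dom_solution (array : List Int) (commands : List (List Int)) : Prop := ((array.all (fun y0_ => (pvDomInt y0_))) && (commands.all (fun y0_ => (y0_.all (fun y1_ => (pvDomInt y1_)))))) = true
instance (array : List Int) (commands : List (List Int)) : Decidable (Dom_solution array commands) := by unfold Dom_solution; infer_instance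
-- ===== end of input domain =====

-- B replaces the full sort of each slice by a bounded selection buffer of the k smallest elements (alternative algorithm, same cost class).

-- ===== PORT A =====
-- literal port of A: for each command, sort the slice and take element k-1
-- (pyGetD is used where Python would raise IndexError; Pre_solution excludes those inputs)
def solution (array : List Int) (commands : List (List Int)) : List Int :=
  commands.foldl (fun answer com =>
    let i := PySem.List.pyGetD com 0 0
    let j := PySem.List.pyGetD com 1 0
    let k := PySem.List.pyGetD com 2 0
    let array2 := PySem.List.sorted (PySem.List.slice array (some (i - 1)) (some j)) (fun v => v) false
    answer ++ [PySem.List.pyGetD array2 (k - 1) 0]) []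

-- ===== PORT B =====
-- B-side helper: one step of B's inner loop — keep the k smallest values seen, ascending
def bStep (k : Int) (best : List Int) (x : Int) : List Int :=
  if (best.length : Int) < k ∨ x < PySem.List.pyGetD best (-1) 0 then
    PySem.List.slice (best.filter (fun v => decide (v ≤ x)) ++ [x] ++ best.filter (fun v => decide (x < v))) none (some k)
  else best

def solution_alt (array : List Int) (commands : List (List Int)) : List Int :=
  commands.foldl (fun answer com =>
    let i := PySem.List.pyGetD com 0 0
    let j := PySem.List.pyGetD com 1 0
    let k := PySem.List.pyGetD com 2 0
    let best := (PySem.List.slice array (some (i - 1)) (some j)).foldl (bStep k) []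
    answer ++ [PySem.List.pyGetD best (k - 1) 0]) []

-- ===== PRECONDITION & SPEC =====
-- Pre_ excludes commands on which A raises (fewer than 3 entries, or index k-1 outside the
-- sorted slice), and also k ≤ 0 with -len ≤ k-1 < 0, where A's negative-index wraparound
-- accidentally returns a value while B's selection buffer naturally raises IndexError.
def Pre_solution (array : List Int) (commands : List (List Int)) : Prop :=
  ∀ com ∈ commands, 3 ≤ com.length ∧
    1 ≤ PySem.List.pyGetD com 2 0 ∧
    PySem.List.pyGetD com 2 0 ≤
      ((PySem.List.slice array (some (PySem.List.pyGetD com 0 0 - 1)) (some (PySem.List.pyGetD com 1 0))).length : Int)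
instance (array : List Int) (commands : List (List Int)) : Decidable (Pre_solution array commands) := by unfold Pre_solution; infer_instance

def pvWitness_solution : List Int × List (List Int) := ([5, 3, 8, 1], [[2, 4, 2], [1, 3, 1]])

def Spec_solution (array : List Int) (commands : List (List Int)) (out : List Int) : Prop := out = solution_alt array commands
instance (array : List Int) (commands : List (List Int)) (out : List Int) : Decidable (Spec_solution array commands out) := by unfold Spec_solution; infer_instance

-- ===== CLAIM (what is proved, stated in full; the proofs are below) =====
def Claim_equal_solution : Prop := ∀ (array : List Int) (commands : List (List Int)), Dom_solution array commands → Pre_solution array commands → Spec_solution array commands (solution array commands)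

-- ===== LEMMAS AND PROOFS =====

-- insert x into a sorted list, after equal elements (what B's partition step does)
def insSorted (x : Int) (t : List Int) : List Int :=
  t.takeWhile (fun v => decide (v ≤ x)) ++ x :: t.dropWhile (fun v => decide (v ≤ x))

theorem filter_le_eq_takeWhile (x : Int) (t : List Int) (h : t.Pairwise (· ≤ ·)) :
    t.filter (fun v => decide (v ≤ x)) = t.takeWhile (fun v => decide (v ≤ x)) := by
  induction t with
  | nil => rfl
  | cons a t ih =>
    rcases List.pairwise_cons.mp h with ⟨ha', ht⟩
    by_cases hax : a ≤ x
    · simp [hax, ih ht]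
    · have hnil : t.filter (fun v => decide (v ≤ x)) = [] := by
        rw [List.filter_eq_nil_iff]
        intro b hb hbx
        exact hax (le_trans (ha' b hb) (by simpa using hbx))
      simp [hax, hnil]

theorem filter_gt_eq_dropWhile (x : Int) (t : List Int) (h : t.Pairwise (· ≤ ·)) :
    t.filter (fun v => decide (x < v)) = t.dropWhile (fun v => decide (v ≤ x)) := by
  induction t with
  | nil => rfl
  | cons a t ih =>
    rcases List.pairwise_cons.mp h with ⟨ha', ht⟩
    by_cases hax : a ≤ x
    · have hnx : ¬ x < a := not_lt.mpr hax
      simp [hax, hnx, ih ht]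
    · have hxa : x < a := lt_of_not_ge hax
      have hself : t.filter (fun v => decide (x < v)) = t := by
        rw [List.filter_eq_self]
        intro b hb
        simpa using lt_of_lt_of_le hxa (ha' b hb)
      simp [hax, hxa, hself]

theorem mem_dropWhile_gt (x b : Int) (t : List Int) (h : t.Pairwise (· ≤ ·))
    (hb : b ∈ t.dropWhile (fun v => decide (v ≤ x))) : x < b := by
  induction t with
  | nil => simp at hb
  | cons a t ih =>
    rcases List.pairwise_cons.mp h with ⟨ha', ht⟩
    by_cases hax : a ≤ x
    · rw [List.dropWhile_cons_of_pos (by simpa using hax)] at hb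
      exact ih ht hb
    · rw [List.dropWhile_cons_of_neg (by simpa using hax)] at hb
      rcases List.mem_cons.mp hb with rfl | hb'
      · exact lt_of_not_ge hax
      · exact lt_of_lt_of_le (lt_of_not_ge hax) (ha' b hb')

theorem insSorted_perm (x : Int) (t : List Int) : (insSorted x t).Perm (x :: t) := by
  unfold insSorted
  exact (List.perm_middle).trans (by rw [List.takeWhile_append_dropWhile])

theorem insSorted_pairwise (x : Int) (t : List Int) (h : t.Pairwise (· ≤ ·)) :
    (insSorted x t).Pairwise (· ≤ ·) := by
  unfold insSorted
  rw [List.pairwise_append]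
  refine ⟨List.Pairwise.sublist (List.takeWhile_prefix _).sublist h, ?_, ?_⟩
  · rw [List.pairwise_cons]
    exact ⟨fun b hb => le_of_lt (mem_dropWhile_gt x b t h hb),
      List.Pairwise.sublist (List.dropWhile_suffix _).sublist h⟩
  · intro a ha b hb
    have hax : a ≤ x := by simpa using List.mem_takeWhile_imp ha
    rcases List.mem_cons.mp hb with rfl | hb'
    · exact hax
    · exact le_trans hax (le_of_lt (mem_dropWhile_gt x b t h hb'))

theorem sorted_append_singleton (s : List Int) (x : Int) :
    PySem.List.sorted (s ++ [x]) (fun v => v) false = insSorted x (PySem.List.sorted s (fun v => v) false) := by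
  apply PySem.List.sorted_id_eq_of_perm_of_pairwise
  · exact (insSorted_perm x _).trans
      (((PySem.List.sorted_perm s (fun v => v) false).cons x).trans
        (List.perm_append_singleton x s).symm)
  · exact insSorted_pairwise x _ (PySem.List.sorted_pairwise s (fun v => v))

theorem bStep_take (k : Int) (hk : 1 ≤ k) (t : List Int) (h : t.Pairwise (· ≤ ·)) (x : Int) :
    bStep k (t.take k.toNat) x = (insSorted x t).take k.toNat := by
  have hk0 : (0:Int) ≤ k := le_trans (by norm_num) hk
  have hmk : ((k.toNat : Int)) = k := Int.toNat_of_nonneg hk0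
  set m := k.toNat with hm
  have hm1 : 1 ≤ m := by omega
  set b := t.take m with hbdef
  have hbp : b.Pairwise (· ≤ ·) := List.Pairwise.sublist (List.take_sublist m t) h
  have hbl : b.length = min m t.length := by rw [hbdef]; exact List.length_take
  have hfilters :
      b.filter (fun v => decide (v ≤ x)) ++ [x] ++ b.filter (fun v => decide (x < v))
        = b.takeWhile (fun v => decide (v ≤ x)) ++ x :: b.dropWhile (fun v => decide (v ≤ x)) := by
    rw [filter_le_eq_takeWhile x b hbp, filter_gt_eq_dropWhile x b hbp, List.append_assoc]
    rfl
  unfold bStep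
  rw [hfilters, PySem.List.slice_to _ hk0]
  by_cases hshort : b.length < m
  · have hcond : ((b.length : Int) < k ∨ x < PySem.List.pyGetD b (-1) 0) := Or.inl (by omega)
    rw [if_pos hcond]
    have htlen : t.length < m := by omega
    have hbt : b = t := by rw [hbdef]; exact List.take_of_length_le (le_of_lt htlen)
    rw [hbt]
    rfl
  · have hblen : b.length = m := by
      have := List.length_take (i := m) (l := t); omega
    have htm : m ≤ t.length := by
      have := List.length_take (i := m) (l := t); omega
    have hbne : b ≠ [] := by
      intro hc; rw [hc] at hblen; simp at hblen; omega
    have hlastD : PySem.List.pyGetD b (-1) 0 = b.getLast hbne := PySem.List.pyGetD_neg_one b 0 hbne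
    have htb : t = b ++ t.drop m := by rw [hbdef]; exact (List.take_append_drop m t).symm
    by_cases hx : x < b.getLast hbne
    · have hcond : ((b.length : Int) < k ∨ x < PySem.List.pyGetD b (-1) 0) := Or.inr (by rw [hlastD]; exact hx)
      rw [if_pos hcond]
      have hnotall : ¬ (∀ v ∈ b, (fun v => decide (v ≤ x)) v = true) := by
        intro hall
        have hlast := hall (b.getLast hbne) (List.getLast_mem hbne)
        simp only [decide_eq_true_eq] at hlast
        omega
      have htwne : (b.takeWhile (fun v => decide (v ≤ x))).length ≠ b.length := by
        intro hlen
        exact hnotall (List.takeWhile_eq_self_iff.mp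
          ((List.takeWhile_prefix _).eq_of_length hlen))
      have hdwne : (b.dropWhile (fun v => decide (v ≤ x))).isEmpty = false := by
        rw [List.isEmpty_eq_false_iff, Ne, List.dropWhile_eq_nil_iff]
        exact hnotall
      unfold insSorted
      conv_rhs => rw [htb]
      rw [List.takeWhile_append, if_neg htwne, List.dropWhile_append, hdwne]
      simp only [Bool.false_eq_true, if_false]
      have hlen1 : (b.takeWhile (fun v => decide (v ≤ x)) ++ x :: b.dropWhile (fun v => decide (v ≤ x))).length = b.length + 1 := by
        have h2 := congrArg List.length (List.takeWhile_append_dropWhile (p := fun v => decide (v ≤ x)) (l := b))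
        simp only [List.length_append] at h2
        simp only [List.length_append, List.length_cons]
        omega
      have hassoc : b.takeWhile (fun v => decide (v ≤ x)) ++ x :: (b.dropWhile (fun v => decide (v ≤ x)) ++ t.drop m)
            = (b.takeWhile (fun v => decide (v ≤ x)) ++ x :: b.dropWhile (fun v => decide (v ≤ x))) ++ t.drop m := by
        simp
      conv_rhs => rw [hassoc, List.take_append_of_le_length (by omega)]
    · have hcond : ¬ ((b.length : Int) < k ∨ x < PySem.List.pyGetD b (-1) 0) := by
        rw [hlastD]
        push Not
        exact ⟨by omega, not_lt.mp hx⟩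
      rw [if_neg hcond]
      have hall : ∀ v ∈ b, (fun v => decide (v ≤ x)) v = true := by
        intro v hv
        simp only [decide_eq_true_eq]
        have hvle : v ≤ b.getLast hbne := by
          have hbp' := hbp
          conv at hbp' => rw [← List.dropLast_append_getLast hbne]
          rcases List.pairwise_append.mp hbp' with ⟨_, _, hcross⟩
          conv at hv => rw [← List.dropLast_append_getLast hbne]
          rcases List.mem_append.mp hv with hv' | hv'
          · exact hcross v hv' _ (List.mem_singleton_self _)
          · rw [List.mem_singleton.mp hv']
        exact le_trans hvle (not_lt.mp hx)
      have htwb : b.takeWhile (fun v => decide (v ≤ x)) = b := List.takeWhile_eq_self_iff.mpr hall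
      unfold insSorted
      conv_rhs => rw [htb]
      rw [List.takeWhile_append, htwb, if_pos rfl, List.append_assoc,
        List.take_append_of_le_length (by omega), List.take_of_length_le (by omega)]

theorem foldl_bStep (k : Int) (hk : 1 ≤ k) (s : List Int) :
    s.foldl (bStep k) [] = (PySem.List.sorted s (fun v => v) false).take k.toNat := by
  induction s using List.reverseRecOn with
  | nil =>
      rw [show PySem.List.sorted ([] : List Int) (fun v => v) false = [] from rfl, List.take_nil]
      rfl
  | append_singleton s x ih =>
    rw [List.foldl_append, List.foldl_cons, List.foldl_nil, ih,
      bStep_take k hk _ (PySem.List.sorted_pairwise s (fun v => v)) x,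
      sorted_append_singleton]

theorem elem_eq (s : List Int) (k : Int) (hk : 1 ≤ k) (hks : k ≤ (s.length : Int)) :
    PySem.List.pyGetD (s.foldl (bStep k) []) (k - 1) 0
      = PySem.List.pyGetD (PySem.List.sorted s (fun v => v) false) (k - 1) 0 := by
  rw [foldl_bStep k hk s]
  have hlen : (PySem.List.sorted s (fun v => v) false).length = s.length :=
    PySem.List.length_sorted s (fun v => v) false
  have h1 : (0:Int) ≤ k - 1 := by omega
  have hmin : ((PySem.List.sorted s (fun v => v) false).take k.toNat).length = k.toNat := by
    rw [List.length_take, hlen]; omega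
  rw [PySem.List.pyGetD_eq_getElem _ _ h1 (by rw [hmin]; omega),
    PySem.List.pyGetD_eq_getElem _ _ h1 (by rw [hlen]; omega)]
  exact List.getElem_take

theorem foldl_append_congr (f g : List Int → Int) (cs : List (List Int)) :
    ∀ (acc : List Int), (∀ c ∈ cs, f c = g c) →
      cs.foldl (fun a c => a ++ [f c]) acc = cs.foldl (fun a c => a ++ [g c]) acc := by
  induction cs with
  | nil => intro acc _; rfl
  | cons c cs ih =>
    intro acc h
    simp only [List.foldl_cons]
    rw [h c (List.mem_cons_self), ih _ (fun c' hc' => h c' (List.mem_cons_of_mem c hc'))]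

-- ===== VERDICT (by name: the statement is the Claim_ definition above) =====
theorem solution_spec : Claim_equal_solution := by
  intro array commands _ hpre
  unfold Spec_solution solution solution_alt
  refine foldl_append_congr
    (fun com => PySem.List.pyGetD (PySem.List.sorted (PySem.List.slice array (some (PySem.List.pyGetD com 0 0 - 1)) (some (PySem.List.pyGetD com 1 0))) (fun v => v) false) (PySem.List.pyGetD com 2 0 - 1) 0)
    (fun com => PySem.List.pyGetD ((PySem.List.slice array (some (PySem.List.pyGetD com 0 0 - 1)) (some (PySem.List.pyGetD com 1 0))).foldl (bStep (PySem.List.pyGetD com 2 0)) []) (PySem.List.pyGetD com 2 0 - 1) 0)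
    commands [] ?_
  intro com hcom
  rcases hpre com hcom with ⟨_, hk1, hks⟩
  exact (elem_eq _ _ hk1 hks).symm
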